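-- pv_equiv track=rewrite | github.com/usiohc/BOJ_study-baekjunhub- | 프로그래머스/unrated/148653. 마법의 엘리베이터/마법의 엘리베이터.py | solution
-- ===== SOURCE A (Python) =====
-- def solution(storey):
--     answer = 0
--
--     while storey != 0:
--         num = storey % 10
--
--         if num >= 6:
--             storey += 10 - num
--             answer += 10 - num
--         else:
--             if num == 5 and storey//10 %10 >= 5:
--                 storey += 10 - num
--                 answer += 10 - num
--             else:
--                 answer += num
--
--         storey //= 10
--
--     return answer
-- ===== SOURCE B (Python) =====
-- def solution(storey):
--     # Two-state digit DP over the digits of storey (least significant first):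
--     # lo = min presses so far if no carry is sent into the next digit,
--     # hi = min presses so far if a carry is sent into the next digit.
--     INF = 10 ** 12
--     lo, hi = 0, INF
--     while storey != 0:
--         d = storey % 10
--         lo, hi = min(lo + d, hi + d + 1), min(lo + 10 - d, hi + 9 - d)
--         storey //= 10
--     return min(lo, hi + 1)
-- ===== Notes on version B (the rewrite author's own statement) =====
-- stated objective: alternative
-- what changed: Replaces A's mutating greedy (round each digit up or down, pushing a carry back into storey in place) with a two-state dynamic program over the digits that carries lo/hi accumulators (min presses without/with an outgoing carry) and never mutates the number being scanned.
-- outside the precondition, e.g. on solution(-7): A returns 4, B does not finish within the time limit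
import Mathlib
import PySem

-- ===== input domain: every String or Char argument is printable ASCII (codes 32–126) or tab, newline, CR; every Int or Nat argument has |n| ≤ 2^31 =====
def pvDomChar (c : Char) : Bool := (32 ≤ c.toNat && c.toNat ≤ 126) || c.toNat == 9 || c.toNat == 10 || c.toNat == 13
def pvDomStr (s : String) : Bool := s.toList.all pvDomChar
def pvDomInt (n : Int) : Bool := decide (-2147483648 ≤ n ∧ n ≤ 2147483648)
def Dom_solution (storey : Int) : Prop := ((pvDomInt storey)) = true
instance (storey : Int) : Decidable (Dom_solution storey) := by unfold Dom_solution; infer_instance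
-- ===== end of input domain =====

-- B replaces A's mutating greedy (digit rounding with in-place carry) by a two-state
-- digit DP (no-carry / carry accumulators); same asymptotic cost, different algorithm.

-- ===== PORT A =====
-- A's while-loop; the fuel is only a totality guard: every iteration strictly
-- decreases |storey|, so storey.natAbs + 1 steps always suffice.
def solGo (fuel : Nat) (storey answer : Int) : Int :=
  match fuel with
  | 0 => answer
  | f + 1 =>
    if storey = 0 then answer
    else
      let num := PySem.Int.mod storey 10
      if num ≥ 6 then
        solGo f (PySem.Int.floordiv (storey + (10 - num)) 10) (answer + (10 - num))
      else if num = 5 ∧ PySem.Int.mod (PySem.Int.floordiv storey 10) 10 ≥ 5 then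
        solGo f (PySem.Int.floordiv (storey + (10 - num)) 10) (answer + (10 - num))
      else
        solGo f (PySem.Int.floordiv storey 10) (answer + num)

def solution (storey : Int) : Int := solGo (storey.natAbs + 1) storey 0

-- ===== PORT B =====
-- B's while-loop (two DP accumulators); fuel is again only a totality guard.
def altGo (fuel : Nat) (storey lo hi : Int) : Int :=
  match fuel with
  | 0 => min lo (hi + 1)
  | f + 1 =>
    if storey = 0 then min lo (hi + 1)
    else
      let d := PySem.Int.mod storey 10
      altGo f (PySem.Int.floordiv storey 10)
        (min (lo + d) (hi + d + 1)) (min (lo + (10 - d)) (hi + (9 - d)))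

def solution_alt (storey : Int) : Int := altGo (storey.natAbs + 1) storey 0 (10 ^ 12)

-- ===== PRECONDITION & SPEC =====
-- Pre_ excludes negative storeys: they are outside the problem's domain (a storey count),
-- A's value there is an artefact of Python's floor division/modulo carrying the number up
-- toward the loop exit, and B's plain digit-extraction loop does not terminate on them.
def Pre_solution (storey : Int) : Prop := 0 ≤ storey
instance (storey : Int) : Decidable (Pre_solution storey) := by unfold Pre_solution; infer_instance
def pvWitness_solution : Int := (2023)

def Spec_solution (storey : Int) (out : Int) : Prop := out = solution_alt storey
instance (storey : Int) (out : Int) : Decidable (Spec_solution storey out) := by unfold Spec_solution; infer_instance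

-- ===== CLAIM (what is proved, stated in full; the proofs are below) =====
def Claim_equal_solution : Prop := ∀ (storey : Int), Dom_solution storey → Pre_solution storey → Spec_solution storey (solution storey)

-- ===== LEMMAS AND PROOFS =====

-- Greedy cost of A, without the accumulator (proof-side characterisation).
def G (s : Int) : Int :=
  if h0 : s ≤ 0 then 0
  else if s % 10 ≥ 6 then (10 - s % 10) + G (s / 10 + 1)
  else if s % 10 = 5 ∧ (s / 10) % 10 ≥ 5 then (10 - s % 10) + G (s / 10 + 1)
  else s % 10 + G (s / 10)
  termination_by s.natAbs
  decreasing_by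
    · omega
    · omega
    · omega

-- DP values of B: (LH s).1 = best with no incoming carry, (LH s).2 = best with an
-- incoming carry (the final +1 for a carry past the top digit folded in at the base).
def LH (s : Int) : Int × Int :=
  if h0 : s ≤ 0 then (0, 1)
  else (min (s % 10 + (LH (s / 10)).1) ((10 - s % 10) + (LH (s / 10)).2),
        min ((s % 10 + 1) + (LH (s / 10)).1) ((9 - s % 10) + (LH (s / 10)).2))
  termination_by s.natAbs
  decreasing_by
    all_goals omega

theorem G_zero : G 0 = 0 := by rw [G]; simp

theorem G_eq (s : Int) (hs : 0 < s) :
    G s = if s % 10 ≥ 6 then (10 - s % 10) + G (s / 10 + 1)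
      else if s % 10 = 5 ∧ (s / 10) % 10 ≥ 5 then (10 - s % 10) + G (s / 10 + 1)
      else s % 10 + G (s / 10) := by
  rw [G, dif_neg (by omega)]

theorem LH_eq (s : Int) (hs : 0 < s) :
    LH s = (min (s % 10 + (LH (s / 10)).1) ((10 - s % 10) + (LH (s / 10)).2),
            min ((s % 10 + 1) + (LH (s / 10)).1) ((9 - s % 10) + (LH (s / 10)).2)) := by
  rw [LH, dif_neg (by omega)]

theorem G_nonneg : ∀ (n : Nat) (s : Int), s.natAbs ≤ n → 0 ≤ G s := by
  intro n
  induction n using Nat.strong_induction_on with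
  | _ n IH =>
    intro s hn
    by_cases h0 : s ≤ 0
    · rw [G]; simp [h0]
    · rw [G_eq s (by omega)]
      split_ifs with ha hb
      · have h1 : 0 ≤ G (s / 10 + 1) := IH (s / 10 + 1).natAbs (by omega) _ le_rfl
        omega
      · have h1 : 0 ≤ G (s / 10 + 1) := IH (s / 10 + 1).natAbs (by omega) _ le_rfl
        omega
      · have h2 : 0 ≤ G (s / 10) := IH (s / 10).natAbs (by omega) _ le_rfl
        omega

theorem G_le : ∀ (n : Nat) (s : Int), 0 ≤ s → s.natAbs ≤ n → G s ≤ 10 * s.natAbs := by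
  intro n
  induction n using Nat.strong_induction_on with
  | _ n IH =>
    intro s hs hn
    by_cases h0 : s ≤ 0
    · rw [G]; simp [h0]
    · rw [G_eq s (by omega)]
      split_ifs with ha hb
      · have h1 : G (s / 10 + 1) ≤ 10 * (s / 10 + 1).natAbs :=
          IH (s / 10 + 1).natAbs (by omega) _ (by omega) le_rfl
        omega
      · have h1 : G (s / 10 + 1) ≤ 10 * (s / 10 + 1).natAbs :=
          IH (s / 10 + 1).natAbs (by omega) _ (by omega) le_rfl
        omega
      · have h2 : G (s / 10) ≤ 10 * (s / 10).natAbs :=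
          IH (s / 10).natAbs (by omega) _ (by omega) le_rfl
        omega

-- The key comparison between G s and G (s+1), by strong induction on the digits.
theorem G_succ : ∀ (n : Nat) (s : Int), 0 ≤ s → s.natAbs ≤ n →
    (G (s + 1) ≤ G s + 1) ∧ (G s ≤ G (s + 1) + 1) ∧
    (s % 10 ≥ 5 → G (s + 1) ≤ G s) ∧ (s % 10 ≤ 4 → G s ≤ G (s + 1)) := by
  intro n
  induction n using Nat.strong_induction_on with
  | _ n IH =>
    intro s hs hn
    by_cases h0 : s = 0
    · subst h0
      have g1 : G 1 = 1 := by rw [G_eq 1 (by omega)]; norm_num [G_zero]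
      simp [G_zero, g1]
    · have hpos : 0 < s := by omega
      have hq : 0 ≤ s / 10 := by omega
      have hqlt : (s / 10).natAbs < n := by omega
      obtain ⟨q1, q2, q3, q4⟩ := IH (s / 10).natAbs hqlt _ hq le_rfl
      have hGs := G_eq s hpos
      by_cases h9 : s % 10 = 9
      · -- s+1 rolls over: (s+1) % 10 = 0, (s+1)/10 = s/10 + 1
        have hG1 := G_eq (s + 1) (by omega)
        have e1 : (s + 1) % 10 = 0 := by omega
        have e2 : (s + 1) / 10 = s / 10 + 1 := by omega
        rw [e1, e2] at hG1
        norm_num at hG1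
        rw [h9] at hGs; norm_num at hGs
        omega
      · have e1 : (s + 1) % 10 = s % 10 + 1 := by omega
        have e2 : (s + 1) / 10 = s / 10 := by omega
        have hG1 := G_eq (s + 1) (by omega)
        rw [e1, e2] at hG1
        by_cases h4 : s % 10 = 4
        · -- digit becomes 5 in s+1
          rw [h4] at hGs hG1; norm_num at hGs hG1
          by_cases hc : (s / 10) % 10 ≥ 5
          · rw [if_pos hc] at hG1; omega
          · rw [if_neg hc] at hG1; omega
        · by_cases h5 : s % 10 = 5
          · -- digit 5 in s, digit 6 in s+1
            rw [h5] at hGs hG1; norm_num at hG1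
            by_cases hc : (s / 10) % 10 ≥ 5
            · rw [if_neg (by omega), if_pos (by exact ⟨rfl, hc⟩)] at hGs; omega
            · rw [if_neg (by omega), if_neg (by simpa using hc)] at hGs; omega
          · by_cases h6 : s % 10 ≥ 6
            · -- both carry
              rw [if_pos h6] at hGs
              rw [if_pos (by omega)] at hG1
              omega
            · -- digit ≤ 3: neither carries
              rw [if_neg (by omega), if_neg (by omega)] at hGs
              rw [if_neg (by omega), if_neg (by omega)] at hG1
              omega

-- The DP computes exactly the greedy values: L s = G s and H s = G (s+1).
theorem LH_eq_G : ∀ (n : Nat) (s : Int), 0 ≤ s → s.natAbs ≤ n →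
    (LH s).1 = G s ∧ (LH s).2 = G (s + 1) := by
  intro n
  induction n using Nat.strong_induction_on with
  | _ n IH =>
    intro s hs hn
    by_cases h0 : s = 0
    · subst h0
      have g1 : G 1 = 1 := by rw [G_eq 1 (by omega)]; norm_num [G_zero]
      rw [LH]; simp [G_zero, g1]
    · have hpos : 0 < s := by omega
      have hq : 0 ≤ s / 10 := by omega
      have hqlt : (s / 10).natAbs < n := by omega
      obtain ⟨hl, hh⟩ := IH (s / 10).natAbs hqlt _ hq le_rfl
      obtain ⟨q1, q2, q3, q4⟩ := G_succ (s / 10).natAbs _ hq le_rfl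
      rw [LH_eq s hpos, hl, hh]
      have hGs := G_eq s hpos
      constructor
      · -- L s = G s
        by_cases h6 : s % 10 ≥ 6
        · rw [if_pos h6] at hGs; omega
        · by_cases h5 : s % 10 = 5
          · by_cases hc : (s / 10) % 10 ≥ 5
            · rw [if_neg (by omega), if_pos ⟨h5, hc⟩] at hGs; omega
            · rw [if_neg (by omega), if_neg (by simp [h5]; omega)] at hGs; omega
          · rw [if_neg h6, if_neg (by tauto)] at hGs; omega
      · -- H s = G (s+1)
        by_cases h9 : s % 10 = 9
        · have hG1 := G_eq (s + 1) (by omega)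
          have e1 : (s + 1) % 10 = 0 := by omega
          have e2 : (s + 1) / 10 = s / 10 + 1 := by omega
          rw [e1, e2] at hG1; norm_num at hG1
          omega
        · have e1 : (s + 1) % 10 = s % 10 + 1 := by omega
          have e2 : (s + 1) / 10 = s / 10 := by omega
          have hG1 := G_eq (s + 1) (by omega)
          rw [e1, e2] at hG1
          by_cases h4 : s % 10 = 4
          · rw [h4] at hG1; norm_num at hG1
            by_cases hc : (s / 10) % 10 ≥ 5
            · rw [if_pos hc] at hG1; omega
            · rw [if_neg hc] at hG1; omega
          · by_cases h5 : s % 10 ≥ 5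
            · rw [if_pos (by omega)] at hG1; omega
            · rw [if_neg (by omega), if_neg (by omega)] at hG1; omega

-- A's loop with enough fuel computes answer + G storey.
theorem solGo_eq_G : ∀ (fuel : Nat) (s a : Int), 0 ≤ s → s.natAbs < fuel →
    solGo fuel s a = a + G s := by
  intro fuel
  induction fuel with
  | zero => intro s a hs hf; omega
  | succ f IH =>
    intro s a hs hf
    by_cases h0 : s = 0
    · subst h0; simp [solGo, G_zero]
    · have hpos : 0 < s := by omega
      rw [solGo]
      simp only [if_neg h0,
        PySem.Int.mod_eq_emod_of_pos (by omega : (0:Int) < 10),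
        PySem.Int.floordiv_eq_ediv_of_pos (by omega : (0:Int) < 10)]
      have hcar : (s + (10 - s % 10)) / 10 = s / 10 + 1 := by omega
      rw [G_eq s hpos]
      by_cases h6 : s % 10 ≥ 6
      · rw [if_pos h6, if_pos h6, hcar, IH _ _ (by omega) (by omega)]; ring
      · rw [if_neg h6, if_neg h6]
        by_cases hc : s % 10 = 5 ∧ (s / 10) % 10 ≥ 5
        · rw [if_pos hc, if_pos hc, hcar, IH _ _ (by omega) (by omega)]; ring
        · rw [if_neg hc, if_neg hc, IH _ _ (by omega) (by omega)]; ring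

-- B's loop with enough fuel computes min (lo + L s) (hi + H s).
theorem altGo_eq_LH : ∀ (fuel : Nat) (s lo hi : Int), 0 ≤ s → s.natAbs < fuel →
    altGo fuel s lo hi = min (lo + (LH s).1) (hi + (LH s).2) := by
  intro fuel
  induction fuel with
  | zero => intro s lo hi hs hf; omega
  | succ f IH =>
    intro s lo hi hs hf
    by_cases h0 : s = 0
    · subst h0; rw [altGo, if_pos rfl, LH]; norm_num
    · have hpos : 0 < s := by omega
      rw [altGo]
      simp only [if_neg h0,
        PySem.Int.mod_eq_emod_of_pos (by omega : (0:Int) < 10),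
        PySem.Int.floordiv_eq_ediv_of_pos (by omega : (0:Int) < 10)]
      rw [IH _ _ _ (by omega) (by omega), LH_eq s hpos]
      simp only []
      omega

-- ===== VERDICT (by name: the statement is the Claim_ definition above) =====
theorem solution_spec : Claim_equal_solution := by
  unfold Claim_equal_solution
  intro s hdom hpre
  unfold Spec_solution solution solution_alt
  unfold Pre_solution at hpre
  have hdom' : s.natAbs ≤ 2147483648 := by
    unfold Dom_solution pvDomInt at hdom
    simp only [decide_eq_true_eq] at hdom
    omega
  rw [solGo_eq_G _ _ _ hpre (by omega), altGo_eq_LH _ _ _ _ hpre (by omega)]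
  obtain ⟨hl, hh⟩ := LH_eq_G s.natAbs s hpre le_rfl
  rw [hl, hh]
  have h1 : 0 ≤ G (s + 1) := G_nonneg (s + 1).natAbs _ le_rfl
  have h2 : G s ≤ 10 * s.natAbs := G_le s.natAbs s hpre le_rfl
  omega
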